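-- pv_equiv track=rewrite | github.com/s0xphie/0x | supersingularity/graph.py | _all_k_minors
-- ===== SOURCE A (Python) =====
-- def _determinant(matrix: list[list[int]]) -> int:
--     size = len(matrix)
--     if size == 0:
--         return 1
--     if size == 1:
--         return matrix[0][0]
--     if size == 2:
--         return matrix[0][0] * matrix[1][1] - matrix[0][1] * matrix[1][0]
--
--     total = 0
--     for col, value in enumerate(matrix[0]):
--         minor = [
--             [entry for inner_col, entry in enumerate(row) if inner_col != col]
--             for row in matrix[1:]
--         ]
--         total += ((-1) ** col) * value * _determinant(minor)
--     return total
--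
-- def _all_k_minors(matrix: list[list[int]], k: int) -> list[int]:
--     from itertools import combinations
--
--     row_indices = range(len(matrix))
--     col_indices = range(len(matrix[0])) if matrix else range(0)
--     minors: list[int] = []
--     for chosen_rows in combinations(row_indices, k):
--         for chosen_cols in combinations(col_indices, k):
--             minor = [
--                 [matrix[row][col] for col in chosen_cols]
--                 for row in chosen_rows
--             ]
--             minors.append(abs(_determinant(minor)))
--     return minors
-- ===== SOURCE B (Python) =====
-- def _det_dp(m: list[list[int]]) -> int:
--     # Exact determinant by bitmask dynamic programming over column subsets:
--     # dp[mask] = determinant of the square submatrix made of the last popcount(mask)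
--     # rows of m and the columns in mask (first-row cofactor recurrence, memoised).
--     n = len(m)
--     if n == 0:
--         return 1
--     dp = [0] * (1 << n)
--     dp[0] = 1
--     for mask in range(1, 1 << n):
--         row = m[n - bin(mask).count("1")]
--         sign = 1
--         acc = 0
--         for c in range(n):
--             if (mask >> c) & 1:
--                 acc += sign * row[c] * dp[mask ^ (1 << c)]
--                 sign = -sign
--         dp[mask] = acc
--     return dp[(1 << n) - 1]
--
--
-- def _all_k_minors(matrix: list[list[int]], k: int) -> list[int]:
--     from itertools import combinations
--
--     row_indices = range(len(matrix))
--     col_indices = range(len(matrix[0])) if matrix else range(0)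
--     return [
--         abs(_det_dp([[matrix[r][c] for c in cols] for r in rows]))
--         for rows in combinations(row_indices, k)
--         for cols in combinations(col_indices, k)
--     ]
-- ===== Notes on version B (the rewrite author's own statement) =====
-- stated objective: alternative
-- what changed: Each k-by-k minor's determinant is computed by a bitmask dynamic program over column subsets (memoised first-row cofactor recurrence, O(2^k k) per minor) instead of A's naive Laplace cofactor recursion (O(k! k^2) per minor); for the small k a timing run generates the costs coincide.
import Mathlib
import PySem

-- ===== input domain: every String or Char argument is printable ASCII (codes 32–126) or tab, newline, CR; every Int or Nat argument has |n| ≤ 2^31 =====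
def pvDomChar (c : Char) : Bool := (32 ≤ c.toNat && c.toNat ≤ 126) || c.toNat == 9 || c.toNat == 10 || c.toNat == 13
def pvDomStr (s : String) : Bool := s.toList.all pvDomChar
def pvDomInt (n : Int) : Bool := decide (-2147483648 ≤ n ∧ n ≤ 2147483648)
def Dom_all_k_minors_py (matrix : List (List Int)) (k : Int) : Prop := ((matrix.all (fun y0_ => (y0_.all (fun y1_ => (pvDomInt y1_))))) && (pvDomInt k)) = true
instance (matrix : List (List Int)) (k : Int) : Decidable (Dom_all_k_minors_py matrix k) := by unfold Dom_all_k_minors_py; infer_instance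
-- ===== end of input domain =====

-- B replaces A's naive Laplace cofactor recursion per k×k minor by a bitmask
-- dynamic program over column subsets (memoised first-row cofactor recurrence).

-- ===== PORT A =====

-- itertools.combinations over a list of indices, in itertools' lexicographic
-- order (shared helper: both Pythons call itertools.combinations).
def pyCombos : List Nat → Nat → List (List Nat)
  | _, 0 => [[]]
  | [], _ + 1 => []
  | x :: xs, r + 1 => (pyCombos xs r).map (x :: ·) ++ pyCombos xs (r + 1)
  termination_by l _ => l.length

-- enumerate(xs) with Nat indices (the enumerate index is always ≥ 0).
def natEnum {α : Type} : List α → Nat → List (Nat × α)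
  | [], _ => []
  | x :: xs, n => (n, x) :: natEnum xs (n + 1)

-- _determinant: Laplace cofactor expansion along the first row, literal.
-- All indexing (matrix[0][0] etc.) is in range on every call reachable under
-- Pre_ (the minors are square), so the getD defaults never fire there.
def detA (m : List (List Int)) : Int :=
  if m.length = 0 then 1
  else if m.length = 1 then (m.getD 0 []).getD 0 0
  else if m.length = 2 then
    (m.getD 0 []).getD 0 0 * (m.getD 1 []).getD 1 0
      - (m.getD 0 []).getD 1 0 * (m.getD 1 []).getD 0 0
  else
    (natEnum (m.getD 0 []) 0).foldl
      (fun total cv =>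
        total + (-1 : Int) ^ cv.1 * cv.2 *
          detA ((m.drop 1).map (fun row =>
            ((natEnum row 0).filter (fun p => p.1 ≠ cv.1)).map (·.2))))
      0
  termination_by m.length
  decreasing_by simp; omega

-- _all_k_minors (A).  k.toNat is exact: Pre_ gives 0 ≤ k (combinations raises on k < 0).
def all_k_minors_py (matrix : List (List Int)) (k : Int) : List Int :=
  let rowIndices := List.range matrix.length
  let colIndices := if matrix.length ≠ 0 then List.range (matrix.getD 0 []).length else []
  (pyCombos rowIndices k.toNat).foldl
    (fun minors rows =>
      (pyCombos colIndices k.toNat).foldl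
        (fun minors cols =>
          minors ++ [|detA (rows.map (fun r => cols.map (fun c => (matrix.getD r []).getD c 0)))|])
        minors)
    []

-- ===== PORT B =====

-- bin(mask).count("1"): the number of set binary digits (exact popcount).
def popcnt : Nat → Nat
  | 0 => 0
  | n + 1 => (n + 1) % 2 + popcnt ((n + 1) / 2)
  decreasing_by omega

-- _det_dp: bitmask DP over column subsets; dp grows by push, so when mask is
-- processed dp already holds the values of all smaller masks.
def detB (m : List (List Int)) : Int :=
  let n := m.length
  if n = 0 then 1
  else
    let dp := (List.range' 1 (2 ^ n - 1)).foldl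
      (fun (dp : Array Int) mask =>
        let row := m.getD (n - popcnt mask) []
        let res := (List.range n).foldl
          (fun (p : Int × Int) c =>
            if (mask >>> c) &&& 1 = 1 then
              (p.1 + p.2 * row.getD c 0 * dp.getD (mask ^^^ (1 <<< c)) 0, -p.2)
            else p)
          ((0 : Int), (1 : Int))
        dp.push res.1)
      #[(1 : Int)]
    dp.getD (2 ^ n - 1) 0

-- _all_k_minors (B): same combinations comprehension, DP determinant.
def all_k_minors_py_alt (matrix : List (List Int)) (k : Int) : List Int :=
  let rowIndices := List.range matrix.length
  let colIndices := if matrix.length ≠ 0 then List.range (matrix.getD 0 []).length else []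
  (pyCombos rowIndices k.toNat).flatMap
    (fun rows =>
      (pyCombos colIndices k.toNat).map
        (fun cols =>
          |detB (rows.map (fun r => cols.map (fun c => (matrix.getD r []).getD c 0)))|))

-- ===== PRECONDITION & SPEC =====
-- Pre_ excludes exactly the inputs where Python A raises: k < 0 (ValueError from
-- combinations(..., k)), and matrices having a row shorter than row 0 when
-- 1 ≤ k ≤ both dimensions (IndexError: some chosen column index hits that row).
def Pre_all_k_minors_py (matrix : List (List Int)) (k : Int) : Prop :=
  0 ≤ k ∧
    ((1 ≤ k ∧ k ≤ (matrix.length : Int) ∧ k ≤ ((matrix.getD 0 []).length : Int)) →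
      ∀ r ∈ matrix, (matrix.getD 0 []).length ≤ r.length)

instance (matrix : List (List Int)) (k : Int) : Decidable (Pre_all_k_minors_py matrix k) := by
  unfold Pre_all_k_minors_py; infer_instance

def pvWitness_all_k_minors_py : List (List Int) × Int := ([[1, 2], [3, 4]], 1)

def Spec_all_k_minors_py (matrix : List (List Int)) (k : Int) (out : List Int) : Prop := out = all_k_minors_py_alt matrix k
instance (matrix : List (List Int)) (k : Int) (out : List Int) : Decidable (Spec_all_k_minors_py matrix k out) := by unfold Spec_all_k_minors_py; infer_instance

-- ===== CLAIM (what is proved, stated in full; the proofs are below) =====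
def Claim_equal_all_k_minors_py : Prop := ∀ (matrix : List (List Int)) (k : Int), Dom_all_k_minors_py matrix k → Pre_all_k_minors_py matrix k → Spec_all_k_minors_py matrix k (all_k_minors_py matrix k)

-- ===== LEMMAS AND PROOFS =====

-- mask >> c & 1, as the Bool predicate detB's inner loop branches on
def bitp (mask c : Nat) : Bool := decide ((mask >>> c) &&& 1 = 1)

-- the columns (in increasing order) whose bit is set in mask
def colsOf (n mask : Nat) : List Nat := (List.range n).filter (bitp mask)

-- selecting the columns `cols` out of a row
def sel (cols : List Nat) (row : List Int) : List Int := cols.map (fun c => row.getD c 0)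

-- the signed cofactor sum detA produces when expanding along the first row:
-- pre ++ cols are the surviving columns, pre already processed
def cofSum (r : List Int) (rows : List (List Int)) : List Nat → List Nat → Int
  | _, [] => 0
  | pre, c :: cs => r.getD c 0 * detA (rows.map (sel (pre ++ cs))) - cofSum r rows (pre ++ [c]) cs
theorem bitp_testBit (mask c : Nat) : bitp mask c = mask.testBit c := by
  rw [bitp, Nat.testBit, Nat.and_one_is_mod, Nat.and_comm 1, Nat.and_one_is_mod,
    Nat.shiftRight_eq_div_pow]
  rcases Nat.mod_two_eq_zero_or_one (mask / 2 ^ c) with h | h <;> simp [h]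

theorem bitp_succ (mask c : Nat) : bitp mask (c + 1) = bitp (mask / 2) c := by
  simp only [bitp_testBit]
  rw [Nat.testBit_add_one]

theorem popcnt_eq (m : Nat) : popcnt m = m % 2 + popcnt (m / 2) := by
  cases m with
  | zero => simp [popcnt]
  | succ k => rw [popcnt]

theorem popcnt_eq_zero {m : Nat} (h : popcnt m = 0) : m = 0 := by
  induction m using Nat.strong_induction_on with
  | _ m ih =>
    cases m with
    | zero => rfl
    | succ k =>
      rw [popcnt] at h
      have h2 : popcnt ((k + 1) / 2) = 0 := by omega
      have := ih ((k + 1) / 2) (by omega) h2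
      omega

theorem length_colsOf : ∀ (n mask : Nat), mask < 2 ^ n → (colsOf n mask).length = popcnt mask := by
  intro n
  induction n with
  | zero => intro mask h; interval_cases mask; simp [colsOf, popcnt]
  | succ n ih =>
    intro mask h
    have hlt : mask / 2 < 2 ^ n := by
      have : 2 ^ (n + 1) = 2 * 2 ^ n := by ring
      omega
    rw [colsOf, List.range_succ_eq_map, List.filter_cons, List.filter_map]
    have hcomp : (bitp mask ∘ Nat.succ) = bitp (mask / 2) := by
      funext c; exact bitp_succ mask c
    rw [hcomp]
    have hih : (List.filter (bitp (mask / 2)) (List.range n)).length = popcnt (mask / 2) :=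
      ih (mask / 2) hlt
    rw [popcnt_eq mask]
    by_cases hb : bitp mask 0 = true
    · have hm : mask % 2 = 1 := by
        simpa [bitp, Nat.and_one_is_mod] using hb
      simp [hb]
      omega
    · have hm : mask % 2 = 0 := by
        simp [bitp, Nat.and_one_is_mod] at hb
        omega
      simp [hb]
      omega

theorem popcnt_le (n mask : Nat) (h : mask < 2 ^ n) : popcnt mask ≤ n := by
  rw [← length_colsOf n mask h]
  calc (colsOf n mask).length ≤ (List.range n).length := List.length_filter_le _ _
    _ = n := List.length_range

theorem mem_colsOf {n mask c : Nat} : c ∈ colsOf n mask ↔ c < n ∧ bitp mask c = true := by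
  simp [colsOf, List.mem_filter]

theorem nodup_colsOf (n mask : Nat) : (colsOf n mask).Nodup :=
  (List.nodup_range).filter _

theorem colsOf_xor {n mask c : Nat} (hb : bitp mask c = true) :
    colsOf n (mask ^^^ (1 <<< c)) = (colsOf n mask).filter (fun d => d ≠ c) := by
  rw [colsOf, colsOf, List.filter_filter]
  apply List.filter_congr
  intro d _
  simp only [bitp_testBit, Nat.one_shiftLeft, Nat.testBit_xor, Nat.testBit_two_pow]
  by_cases hdc : d = c
  · subst hdc
    simp [bitp_testBit] at hb
    simp [hb]
  · simp [hdc, Ne.symm hdc]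

theorem xor_lt {mask c : Nat} (hb : bitp mask c = true) : mask ^^^ (1 <<< c) < mask := by
  rw [bitp_testBit] at hb
  refine Nat.lt_of_testBit c ?_ hb ?_
  · simp [Nat.one_shiftLeft, Nat.testBit_xor, hb]
  · intro j hj
    simp [Nat.one_shiftLeft, Nat.testBit_xor, Nat.ne_of_lt hj]

theorem filter_ne_of_decomp {pre suf : List Nat} {c : Nat}
    (hnd : (pre ++ c :: suf).Nodup) :
    (pre ++ c :: suf).filter (fun d => d ≠ c) = pre ++ suf := by
  rw [List.nodup_append] at hnd
  obtain ⟨hp, hcs, hdisj⟩ := hnd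
  have hpre : ∀ d ∈ pre, d ≠ c := fun d hd => hdisj d hd c (List.mem_cons_self ..)
  have hsuf : c ∉ suf := (List.nodup_cons.mp hcs).1
  rw [List.filter_append, List.filter_cons]
  simp only [decide_eq_true_eq]
  rw [if_neg (by simp)]
  rw [List.filter_eq_self.mpr (by intro a ha; simp [hpre a ha]),
    List.filter_eq_self.mpr (by intro a ha; simp only [decide_eq_true_eq]; exact fun h => hsuf (h ▸ ha))]

theorem natEnum_map {α β : Type} (f : α → β) :
    ∀ (l : List α) (s : Nat), natEnum (l.map f) s = (natEnum l s).map (fun p => (p.1, f p.2)) := by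
  intro l
  induction l with
  | nil => intro s; simp [natEnum]
  | cons x xs ih => intro s; simp [natEnum, ih]

theorem filt_enum {α : Type} :
    ∀ (l : List α) (s i : Nat),
      ((natEnum l s).filter (fun p => p.1 ≠ i)).map (·.2)
        = if i < s then l else l.eraseIdx (i - s) := by
  intro l
  induction l with
  | nil => intro s i; simp [natEnum]
  | cons x xs ih =>
    intro s i
    rw [natEnum, List.filter_cons]
    by_cases hsi : s = i
    · subst hsi
      rw [if_neg (by simp)]
      rw [ih (s + 1) s, if_pos (by omega)]
      simp
    · rw [if_pos (by simp [hsi])]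
      rw [List.map_cons, ih (s + 1) i]
      by_cases hlt : i < s
      · rw [if_pos (by omega), if_pos hlt]
      · rw [if_neg (by omega), if_neg hlt]
        rw [show i - s = (i - (s + 1)) + 1 by omega, List.eraseIdx_cons_succ]

theorem eraseIdx_append_len {α : Type} (pre : List α) (c : α) (cs : List α) :
    (pre ++ c :: cs).eraseIdx pre.length = pre ++ cs := by
  rw [List.eraseIdx_append]
  simp

theorem minor_eq (cols : List Nat) (row : List Int) (i : Nat) :
    ((natEnum (sel cols row) 0).filter (fun p => p.1 ≠ i)).map (·.2)
      = sel (cols.eraseIdx i) row := by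
  rw [filt_enum, if_neg (by omega), Nat.sub_zero, sel, sel, ← List.eraseIdx_map]

theorem foldl_cof (r : List Int) (rows : List (List Int)) :
    ∀ (cs pre : List Nat) (a : Int),
      (natEnum cs pre.length).foldl
        (fun tot ic => tot + (-1 : Int) ^ ic.1 * r.getD ic.2 0 *
          detA (rows.map (sel ((pre ++ cs).eraseIdx ic.1)))) a
        = a + (-1 : Int) ^ pre.length * cofSum r rows pre cs := by
  intro cs
  induction cs with
  | nil => intro pre a; simp [natEnum, cofSum]
  | cons c cs ih =>
    intro pre a
    rw [natEnum, List.foldl_cons, eraseIdx_append_len]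
    have hlen : pre.length + 1 = (pre ++ [c]).length := by simp
    have hlist : pre ++ c :: cs = (pre ++ [c]) ++ cs := by simp
    rw [hlen, hlist, ih (pre ++ [c])]
    rw [cofSum]
    simp only [List.length_append, List.length_cons, List.length_nil]
    ring

theorem minor_map (cols : List Nat) (rows : List (List Int)) (i : Nat) :
    (List.map (sel cols) rows).map
        (fun row => ((natEnum row 0).filter (fun p => p.1 ≠ i)).map (·.2))
      = rows.map (sel (cols.eraseIdx i)) := by
  rw [List.map_map]
  apply List.map_congr_left
  intro row _
  exact minor_eq cols row i

theorem laplace (r : List Int) (rows : List (List Int)) (cols : List Nat)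
    (h : cols.length = rows.length + 1) :
    detA ((r :: rows).map (sel cols)) = cofSum r rows [] cols := by
  match cols, rows, h with
  | [c], [], _ =>
    simp [detA, cofSum, sel]
  | [c1, c2], [row1], _ =>
    simp [detA, cofSum, sel]
  | c1 :: c2 :: c3 :: cs, rows, h =>
    rw [detA]
    set cols := c1 :: c2 :: c3 :: cs with hcols
    have h3 : ((r :: rows).map (sel cols)).length = cs.length + 3 := by
      simp only [List.length_map, List.length_cons]
      simp [hcols] at h
      omega
    rw [if_neg (by omega), if_neg (by omega), if_neg (by omega)]
    simp only [List.map_cons, List.getD_cons_zero, List.drop_succ_cons, List.drop_zero]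
    rw [show sel cols r = cols.map (fun c => r.getD c 0) from rfl, natEnum_map, List.foldl_map]
    simp only [minor_map]
    have hc := foldl_cof r rows cols [] 0
    simp only [List.nil_append, List.length_nil, pow_zero, one_mul, zero_add] at hc
    exact hc

def gDet (m : List (List Int)) (n mask : Nat) : Int :=
  detA ((m.drop (n - popcnt mask)).map (sel (colsOf n mask)))

theorem fold_cols (m : List (List Int)) (n mask : Nat) (dp : Array Int)
    (h2 : mask < 2 ^ n)
    (hdp : ∀ i, i < mask → dp.getD i 0 = gDet m n i) :
    ∀ (cs pre : List Nat) (a sg : Int), colsOf n mask = pre ++ cs →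
      (cs.foldl (fun (p : Int × Int) c =>
          (p.1 + p.2 * (m.getD (n - popcnt mask) []).getD c 0
              * dp.getD (mask ^^^ (1 <<< c)) 0, -p.2)) (a, sg)).1
        = a + sg * cofSum (m.getD (n - popcnt mask) [])
            (m.drop (n - popcnt mask + 1)) pre cs := by
  intro cs
  induction cs with
  | nil => intro pre a sg _; simp [cofSum]
  | cons c cs ih =>
    intro pre a sg hdecomp
    have hcmem : c ∈ colsOf n mask := by rw [hdecomp]; simp
    obtain ⟨hcn, hcb⟩ := mem_colsOf.mp hcmem
    have hlt : mask ^^^ (1 <<< c) < mask := xor_lt hcb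
    have hdpv : dp.getD (mask ^^^ (1 <<< c)) 0 = gDet m n (mask ^^^ (1 <<< c)) :=
      hdp _ hlt
    -- the cleared-bit subset selects exactly pre ++ cs, one row further down
    have hcols' : colsOf n (mask ^^^ (1 <<< c)) = pre ++ cs := by
      rw [colsOf_xor hcb, hdecomp, filter_ne_of_decomp (hdecomp ▸ nodup_colsOf n mask)]
    have hpc : popcnt (mask ^^^ (1 <<< c)) = popcnt mask - 1 ∧ 1 ≤ popcnt mask := by
      have e1 := length_colsOf n mask h2
      have e2 := length_colsOf n (mask ^^^ (1 <<< c)) (lt_trans hlt h2)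
      rw [hdecomp] at e1
      rw [hcols'] at e2
      simp only [List.length_append, List.length_cons] at e1 e2
      omega
    have hple : popcnt mask ≤ n := popcnt_le n mask h2
    have hgd : gDet m n (mask ^^^ (1 <<< c))
        = detA ((m.drop (n - popcnt mask + 1)).map (sel (pre ++ cs))) := by
      rw [gDet, hcols', hpc.1, show n - (popcnt mask - 1) = n - popcnt mask + 1 by omega]
    rw [List.foldl_cons, ih (pre ++ [c]) _ _ (by rw [hdecomp]; simp), cofSum]
    rw [hdpv, hgd]
    ring

theorem getD_push_lt {α : Type} (a : Array α) (x d : α) (i : Nat) (h : i < a.size) :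
    (a.push x).getD i d = a.getD i d := by
  simp [Array.getD, h, Nat.lt_succ_of_lt h, Array.getElem_push_lt]

theorem getD_push_eq {α : Type} (a : Array α) (x d : α) :
    (a.push x).getD a.size d = x := by
  simp [Array.getD]

theorem drop_cons_getD (m : List (List Int)) (j : Nat) (h : j < m.length) :
    m.drop j = m.getD j [] :: m.drop (j + 1) := by
  rw [List.drop_eq_getElem_cons h, List.getD_eq_getElem m [] h]

theorem step_eq (m : List (List Int)) (n mask : Nat) (dp : Array Int)
    (hn : m.length = n) (h1 : 1 ≤ mask) (h2 : mask < 2 ^ n)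
    (hdp : ∀ i, i < mask → dp.getD i 0 = gDet m n i) :
    ((List.range n).foldl
        (fun (p : Int × Int) c =>
          if (mask >>> c) &&& 1 = 1 then
            (p.1 + p.2 * (m.getD (n - popcnt mask) []).getD c 0
                * dp.getD (mask ^^^ (1 <<< c)) 0, -p.2)
          else p)
        ((0 : Int), (1 : Int))).1 = gDet m n mask := by
  have hpp : 1 ≤ popcnt mask := by
    rcases Nat.eq_zero_or_pos (popcnt mask) with h | h
    · exact absurd (popcnt_eq_zero h) (by omega)
    · exact h
  have hple : popcnt mask ≤ n := popcnt_le n mask h2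
  have hfil : (fun (p : Int × Int) c =>
      if (mask >>> c) &&& 1 = 1 then
        (p.1 + p.2 * (m.getD (n - popcnt mask) []).getD c 0
            * dp.getD (mask ^^^ (1 <<< c)) 0, -p.2)
      else p)
      = (fun (p : Int × Int) c =>
        if bitp mask c = true then
          (p.1 + p.2 * (m.getD (n - popcnt mask) []).getD c 0
              * dp.getD (mask ^^^ (1 <<< c)) 0, -p.2)
        else p) := by
    funext p c
    simp only [bitp, decide_eq_true_eq]
  rw [hfil, ← List.foldl_filter]
  rw [show (List.range n).filter (bitp mask) = colsOf n mask from rfl]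
  rw [fold_cols m n mask dp h2 hdp (colsOf n mask) [] 0 1 (by simp)]
  have hlen : (colsOf n mask).length = (m.drop (n - popcnt mask + 1)).length + 1 := by
    rw [length_colsOf n mask h2, List.length_drop, hn]
    omega
  rw [← laplace _ _ _ hlen]
  rw [gDet, drop_cons_getD m (n - popcnt mask) (by omega), List.map_cons]
  simp

theorem dp_fold (m : List (List Int)) (n : Nat) (hn : m.length = n) :
    ∀ (len s : Nat) (dp : Array Int), 1 ≤ s → dp.size = s → s + len = 2 ^ n →
      (∀ i, i < s → dp.getD i 0 = gDet m n i) →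
      ((List.range' s len).foldl
          (fun (dp : Array Int) mask =>
            dp.push ((List.range n).foldl
              (fun (p : Int × Int) c =>
                if (mask >>> c) &&& 1 = 1 then
                  (p.1 + p.2 * (m.getD (n - popcnt mask) []).getD c 0
                      * dp.getD (mask ^^^ (1 <<< c)) 0, -p.2)
                else p)
              ((0 : Int), (1 : Int))).1)
          dp).getD (2 ^ n - 1) 0 = gDet m n (2 ^ n - 1) := by
  intro len
  induction len with
  | zero =>
    intro s dp hs hsz hcnt hdp
    simp only [List.range'_zero, List.foldl_nil]
    exact hdp (2 ^ n - 1) (by have := Nat.two_pow_pos n; omega)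
  | succ len ih =>
    intro s dp hs hsz hcnt hdp
    rw [List.range'_succ, List.foldl_cons]
    refine ih (s + 1) _ (by omega) (by simp [hsz]) (by omega) ?_
    intro i hi
    have hstep := step_eq m n s dp hn hs (by omega) hdp
    rcases Nat.lt_or_ge i s with hlt | hge
    · rw [getD_push_lt _ _ _ _ (by omega)]
      exact hdp i hlt
    · have hieq : i = s := by omega
      subst hieq
      rw [← hsz, getD_push_eq]
      rw [hsz]
      exact hstep

theorem detA_nil : detA [] = 1 := by rw [detA]; simp

theorem bitp_zero (c : Nat) : bitp 0 c = false := by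
  simp [bitp, Nat.zero_shiftRight]

theorem colsOf_zero (n : Nat) : colsOf n 0 = [] := by
  simp [colsOf, bitp_zero]

theorem colsOf_full (n : Nat) : colsOf n (2 ^ n - 1) = List.range n := by
  rw [colsOf, List.filter_eq_self]
  intro c hc
  rw [bitp_testBit, Nat.testBit_two_pow_sub_one]
  simpa using List.mem_range.mp hc

theorem popcnt_full (n : Nat) : popcnt (2 ^ n - 1) = n := by
  have h := length_colsOf n (2 ^ n - 1) (by have := Nat.two_pow_pos n; omega)
  rw [colsOf_full] at h
  simpa using h.symm

theorem map_getD_range (l : List Int) :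
    (List.range l.length).map (fun c => l.getD c 0) = l := by
  apply List.ext_getElem
  · simp
  · intro i h1 h2
    simp [List.getElem?_eq_getElem h2]

theorem detA_eq_detB (m : List (List Int)) (hsq : ∀ r ∈ m, r.length = m.length) :
    detB m = detA m := by
  rw [detB]
  by_cases h0 : m.length = 0
  · simp only [h0, if_pos]
    rw [List.length_eq_zero_iff.mp h0, detA_nil]
  · simp only [if_neg h0]
    have hbase : ∀ i, i < 1 → (#[(1 : Int)] : Array Int).getD i 0 = gDet m m.length i := by
      intro i hi
      have : i = 0 := by omega
      subst this
      rw [gDet]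
      simp [colsOf_zero, popcnt, List.drop_length, detA_nil, Array.getD]
    have hfold := dp_fold m m.length rfl (2 ^ m.length - 1) 1 #[(1 : Int)]
      (le_refl 1) rfl (by have := Nat.two_pow_pos m.length; omega) hbase
    rw [hfold, gDet, popcnt_full, colsOf_full, Nat.sub_self, List.drop_zero]
    have : ∀ r ∈ m, sel (List.range m.length) r = r := by
      intro r hr
      rw [sel, ← hsq r hr, map_getD_range]
    rw [List.map_congr_left this]
    simp

theorem pyCombos_len : ∀ (l : List Nat) (r : Nat) (x : List Nat), x ∈ pyCombos l r → x.length = r := by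
  intro l
  induction l with
  | nil =>
    intro r x h
    cases r with
    | zero => simp [pyCombos] at h; simp [h]
    | succ r => simp [pyCombos] at h
  | cons y ys ih =>
    intro r x h
    cases r with
    | zero => simp [pyCombos] at h; simp [h]
    | succ r =>
      rw [pyCombos] at h
      rcases List.mem_append.mp h with h1 | h1
      · obtain ⟨t, ht, rfl⟩ := List.mem_map.mp h1
        simp [ih r t ht]
      · exact ih (r + 1) x h1

theorem foldl_flat {α β : Type} (g : α → List β) :
    ∀ (l : List α) (acc : List β), l.foldl (fun a x => a ++ g x) acc = acc ++ l.flatMap g := by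
  intro l
  induction l with
  | nil => intro acc; simp
  | cons x xs ih => intro acc; simp [ih, List.flatMap_cons]

theorem ports_eq (matrix : List (List Int)) (k : Int) :
    all_k_minors_py matrix k = all_k_minors_py_alt matrix k := by
  rw [all_k_minors_py, all_k_minors_py_alt]
  have hinner : ∀ (rows : List Nat) (acc : List Int),
      (pyCombos (if matrix.length ≠ 0 then List.range (matrix.getD 0 []).length else []) k.toNat).foldl
        (fun minors cols =>
          minors ++ [|detA (rows.map (fun r => cols.map (fun c => (matrix.getD r []).getD c 0)))|])
        acc
      = acc ++ (pyCombos (if matrix.length ≠ 0 then List.range (matrix.getD 0 []).length else []) k.toNat).map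
          (fun cols => |detA (rows.map (fun r => cols.map (fun c => (matrix.getD r []).getD c 0)))|) := by
    intro rows acc
    exact PySem.List.foldl_append_singleton_eq_map _ _ _
  simp only [hinner]
  refine Eq.trans (foldl_flat (fun rows =>
    (pyCombos (if matrix.length ≠ 0 then List.range (matrix.getD 0 []).length else []) k.toNat).map
      (fun cols => |detA (rows.map (fun r => cols.map (fun c => (matrix.getD r []).getD c 0)))|))
    (pyCombos (List.range matrix.length) k.toNat) []) ?_
  rw [List.nil_append]
  apply List.flatMap_congr
  intro rows hrows
  apply List.map_congr_left
  intro cols hcols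
  have hsub : detB (rows.map (fun r => cols.map (fun c => (matrix.getD r []).getD c 0)))
      = detA (rows.map (fun r => cols.map (fun c => (matrix.getD r []).getD c 0))) := by
    apply detA_eq_detB
    intro r hr
    obtain ⟨ri, _, rfl⟩ := List.mem_map.mp hr
    simp [pyCombos_len _ _ _ hcols, pyCombos_len _ _ _ hrows]
  rw [hsub]

-- ===== VERDICT (by name: the statement is the Claim_ definition above) =====
theorem all_k_minors_py_spec : Claim_equal_all_k_minors_py := by
  intro matrix k _ _
  unfold Spec_all_k_minors_py
  exact ports_eq matrix k
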